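-- pv_equiv track=rewrite | github.com/BgDaniel/galois_toolkit | helpers.py | ext_tuples
-- ===== SOURCE A (Python) =====
-- def ext_tuples(tuples, m_min, m_max):
--     tuples_ext = []
--
--     if len(tuples) == 0:
--         for i in range(m_min, m_max):
--             tuples_ext.append([i])
--
--         return tuples_ext
--
--     for tple in tuples:
--         for i in range(m_min, m_max):
--             tple_cpy = list(tple)
--             tple_cpy.append(i)
--             tuples_ext.append(tple_cpy)
--
--     return tuples_ext
-- ===== SOURCE B (Python) =====
-- def ext_tuples(tuples, m_min, m_max):
--     base = tuples if tuples else [[]]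
--     m = m_max - m_min
--     if m <= 0:
--         return []
--     return [base[k // m] + [m_min + k % m] for k in range(len(base) * m)]
-- ===== Notes on version B (the rewrite author's own statement) =====
-- stated objective: alternative
-- what changed: Replaces A's branch on empty input plus nested loops (outer over tuples, inner over the range, with explicit copy/append) by a single flat arithmetic loop over range(len(base)*m) that recovers the tuple index and range offset of each output position by divmod (k//m, k%m), with the empty case absorbed into base=[[]].
import Mathlib
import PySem

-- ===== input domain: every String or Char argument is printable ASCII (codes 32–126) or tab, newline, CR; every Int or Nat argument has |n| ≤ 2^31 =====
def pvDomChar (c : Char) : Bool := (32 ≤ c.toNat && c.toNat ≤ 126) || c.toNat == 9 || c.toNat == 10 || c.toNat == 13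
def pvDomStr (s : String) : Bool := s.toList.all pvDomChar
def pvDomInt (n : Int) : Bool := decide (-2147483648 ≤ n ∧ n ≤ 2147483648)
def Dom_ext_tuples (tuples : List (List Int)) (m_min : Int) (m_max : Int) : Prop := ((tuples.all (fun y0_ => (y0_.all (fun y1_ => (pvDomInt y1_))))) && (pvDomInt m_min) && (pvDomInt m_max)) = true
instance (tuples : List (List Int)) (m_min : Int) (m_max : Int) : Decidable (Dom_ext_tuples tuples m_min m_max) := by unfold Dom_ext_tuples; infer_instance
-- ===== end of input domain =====

-- B replaces A's branch + nested loops by a single flat index loop over range(len(base)*m)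
-- that reconstructs tuple index and range offset by divmod (objective: alternative, same cost).

-- ===== PORT A =====
def ext_tuples (tuples : List (List Int)) (m_min : Int) (m_max : Int) : List (List Int) :=
  if tuples.length == 0 then
    (PySem.List.pyRange m_min m_max 1).foldl (fun acc i => acc ++ [[i]]) []
  else
    tuples.foldl (fun acc tple =>
      (PySem.List.pyRange m_min m_max 1).foldl (fun acc i => acc ++ [tple ++ [i]]) acc) []

-- ===== PORT B =====
-- base[k // m] is always in range (0 ≤ k < len(base)*m, m > 0), so the .getD [] default is never used.
def ext_tuples_alt (tuples : List (List Int)) (m_min : Int) (m_max : Int) : List (List Int) :=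
  let base := if tuples.isEmpty then [([] : List Int)] else tuples
  let m := m_max - m_min
  if m ≤ 0 then []
  else
    (PySem.List.pyRange 0 ((base.length : Int) * m) 1).map (fun k =>
      (PySem.List.pyGet? base (PySem.Int.floordiv k m)).getD [] ++ [m_min + PySem.Int.mod k m])

-- ===== PRECONDITION & SPEC =====
def Spec_ext_tuples (tuples : List (List Int)) (m_min : Int) (m_max : Int) (out : List (List Int)) : Prop := out = ext_tuples_alt tuples m_min m_max
instance (tuples : List (List Int)) (m_min : Int) (m_max : Int) (out : List (List Int)) : Decidable (Spec_ext_tuples tuples m_min m_max out) := by unfold Spec_ext_tuples; infer_instance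

-- ===== CLAIM (what is proved, stated in full; the proofs are below) =====
def Claim_equal_ext_tuples : Prop := ∀ (tuples : List (List Int)) (m_min : Int) (m_max : Int), Dom_ext_tuples tuples m_min m_max → Spec_ext_tuples tuples m_min m_max (ext_tuples tuples m_min m_max)

-- ===== LEMMAS AND PROOFS =====

-- Both programs compute base.flatMap (blocks); A by nested loops, B by flat divmod indexing.
def pvBlocks (m_min m_max : Int) (base : List (List Int)) : List (List Int) :=
  base.flatMap (fun t => (PySem.List.pyRange m_min m_max 1).map (fun i => t ++ [i]))

lemma flatten_map_single {α β : Type} (f : α → β) (l : List α) :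
    (l.map (fun x => [f x])).flatten = l.map f := by
  induction l with
  | nil => simp
  | cons x xs ih => simp [ih]

lemma A_eq_blocks (tuples : List (List Int)) (m_min m_max : Int) :
    ext_tuples tuples m_min m_max
      = pvBlocks m_min m_max (if tuples.isEmpty then [[]] else tuples) := by
  unfold ext_tuples pvBlocks
  cases tuples with
  | nil =>
      simp [flatten_map_single, List.flatMap_def]
  | cons t ts =>
      have h : ∀ (l : List (List Int)) (acc : List (List Int)),
          l.foldl (fun acc tple =>
            (PySem.List.pyRange m_min m_max 1).foldl (fun acc i => acc ++ [tple ++ [i]]) acc) acc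
          = acc ++ l.flatMap (fun tple => (PySem.List.pyRange m_min m_max 1).map (fun i => tple ++ [i])) := by
        intro l
        induction l with
        | nil => intro acc; simp
        | cons x xs ih =>
            intro acc
            simp [List.foldl_cons, flatten_map_single, List.append_assoc, List.flatMap_def]
      simpa [flatten_map_single, List.flatMap_def] using h (t :: ts) []

-- core of B: flat divmod indexing over Nat ranges equals the block decomposition
lemma flat_eq_blocks (m_min : Int) (mN : Nat) (base : List (List Int)) :
    (List.range (base.length * mN)).map (fun (k : Nat) =>
        (PySem.List.pyGet? base (PySem.Int.floordiv (k : Int) (mN : Int))).getD []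
          ++ [m_min + PySem.Int.mod (k : Int) (mN : Int)])
    = base.flatMap (fun t => (List.range mN).map (fun (r : Nat) => t ++ [m_min + (r : Int)])) := by
  induction base using List.reverseRecOn with
  | nil => simp
  | append_singleton bs t ih =>
      have hlen : (bs ++ [t]).length * mN = bs.length * mN + mN := by
        simp [List.length_append, Nat.add_mul]
      rw [hlen, List.range_add, List.map_append, List.flatMap_append]
      congr 1
      · -- indices below bs.length * mN hit bs
        rw [← ih]
        apply List.map_congr_left
        intro k hk
        have hk' : k < bs.length * mN := List.mem_range.mp hk
        have hq : k / mN < bs.length := Nat.div_lt_of_lt_mul (by rwa [Nat.mul_comm] at hk')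
        rw [PySem.Int.floordiv_natCast, PySem.Int.mod_natCast,
            PySem.List.pyGet?_natCast, PySem.List.pyGet?_natCast]
        simp [List.getElem?_append_left hq]
      · -- the appended block of indices bs.length * mN + r hits t
        simp only [List.map_map, List.flatMap_singleton]
        apply List.map_congr_left
        intro r hr
        have hr' : r < mN := List.mem_range.mp hr
        have hdiv : (bs.length * mN + r) / mN = bs.length := by
          rw [Nat.mul_comm, Nat.mul_add_div (by omega), Nat.div_eq_of_lt hr']; omega
        have hmod : (bs.length * mN + r) % mN = r := by
          rw [Nat.mul_comm, Nat.mul_add_mod, Nat.mod_eq_of_lt hr']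
        rw [Function.comp_apply, PySem.Int.floordiv_natCast, PySem.Int.mod_natCast,
            hdiv, hmod, PySem.List.pyGet?_natCast]
        simp

lemma B_eq_blocks (tuples : List (List Int)) (m_min m_max : Int) :
    ext_tuples_alt tuples m_min m_max
      = pvBlocks m_min m_max (if tuples.isEmpty then [[]] else tuples) := by
  unfold ext_tuples_alt pvBlocks
  set base := if tuples.isEmpty then [([] : List Int)] else tuples with hbase
  by_cases hm : m_max - m_min ≤ 0
  · have hr : PySem.List.pyRange m_min m_max 1 = [] := by
      rw [PySem.List.pyRange_one]
      have : (m_max - m_min).toNat = 0 := by omega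
      simp [this]
    simp [hm, hr]
  · rw [not_le] at hm
    simp only [if_neg (not_le.mpr hm)]
    have hmn : m_max - m_min = (((m_max - m_min).toNat : Nat) : Int) :=
      (Int.toNat_of_nonneg (by omega)).symm
    have hN : (((base.length : Int) * (m_max - m_min)) - 0).toNat
        = base.length * (m_max - m_min).toNat := by
      rw [sub_zero]
      conv_lhs => rw [hmn]
      rw [← Nat.cast_mul, Int.toNat_natCast]
    rw [PySem.List.pyRange_one 0, PySem.List.pyRange_one m_min m_max, hN]
    rw [List.map_map]
    have key := flat_eq_blocks m_min (m_max - m_min).toNat base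
    calc (List.range (base.length * (m_max - m_min).toNat)).map
          ((fun k => (PySem.List.pyGet? base (PySem.Int.floordiv k (m_max - m_min))).getD []
              ++ [m_min + PySem.Int.mod k (m_max - m_min)]) ∘ (fun (k : Nat) => (0 : Int) + (k : Int)))
        = (List.range (base.length * (m_max - m_min).toNat)).map (fun (k : Nat) =>
            (PySem.List.pyGet? base (PySem.Int.floordiv (k : Int) (((m_max - m_min).toNat : Nat) : Int))).getD []
              ++ [m_min + PySem.Int.mod (k : Int) (((m_max - m_min).toNat : Nat) : Int)]) := by
          apply List.map_congr_left
          intro k _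
          simp only [Function.comp_apply, zero_add, ← hmn]
      _ = base.flatMap (fun t => (List.range (m_max - m_min).toNat).map (fun (r : Nat) => t ++ [m_min + (r : Int)])) := key
      _ = base.flatMap (fun t => ((List.range (m_max - m_min).toNat).map (fun (k : Nat) => m_min + (k : Int))).map (fun i => t ++ [i])) := by
          simp only [List.map_map, Function.comp_def]

-- ===== VERDICT (by name: the statement is the Claim_ definition above) =====
theorem ext_tuples_spec : Claim_equal_ext_tuples := by
  intro tuples m_min m_max _
  show ext_tuples tuples m_min m_max = ext_tuples_alt tuples m_min m_max
  rw [A_eq_blocks, B_eq_blocks]
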